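-- pv_equiv track=rewrite | github.com/ronkoch2-code/code-standards-auditor | services/standards_research_service.py | _parse_patterns
-- ===== SOURCE A (Python) =====
-- from typing import Dict, List, Optional, Any
--
-- def _parse_patterns(response: str) -> List[Dict[str, Any]]:
--     """Parse discovered patterns from LLM response."""
--     # This would need more sophisticated parsing
--     # For now, return a structured response
--     patterns = []
--
--     # Simple parsing logic (would be enhanced)
--     lines = response.split('\n')
--     current_pattern = {}
--
--     for line in lines:
--         if line.startswith("Pattern name:"):
--             if current_pattern:
--                 patterns.append(current_pattern)
--             current_pattern = {"name": line.replace("Pattern name:", "").strip()}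
--         elif line.startswith("Description:"):
--             current_pattern["description"] = line.replace("Description:", "").strip()
--         elif line.startswith("Frequency:"):
--             current_pattern["frequency"] = line.replace("Frequency:", "").strip()
--         elif line.startswith("Recommendation:"):
--             current_pattern["recommendation"] = line.replace("Recommendation:", "").strip()
--         elif line.startswith("Priority:"):
--             current_pattern["priority"] = line.replace("Priority:", "").strip()
--
--     if current_pattern:
--         patterns.append(current_pattern)
--
--     return patterns
-- ===== SOURCE B (Python) =====
-- def _parse_patterns(response):
--     """Parse discovered patterns from LLM response.
--
--     Re-implementation: first group the lines into raw blocks (a new block at each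
--     'Pattern name:' line), then build each block's dict with a prefix/key table,
--     keeping only the non-empty dicts.
--     """
--     _KEYS = (
--         ("Pattern name:", "name"),
--         ("Description:", "description"),
--         ("Frequency:", "frequency"),
--         ("Recommendation:", "recommendation"),
--         ("Priority:", "priority"),
--     )
--     blocks = []
--     for line in response.split('\n'):
--         if line.startswith("Pattern name:") or not blocks:
--             blocks.append([line])
--         else:
--             blocks[-1].append(line)
--     patterns = []
--     for block in blocks:
--         d = {}
--         for line in block:
--             for prefix, key in _KEYS:
--                 if line.startswith(prefix):
--                     d[key] = line.replace(prefix, "").strip()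
--                     break
--         if d:
--             patterns.append(d)
--     return patterns
-- ===== Notes on version B (the rewrite author's own statement) =====
-- stated objective: alternative
-- what changed: B first groups the split lines into raw blocks (a new block at every 'Pattern name:' line), then builds each block's dict with a single prefix/key lookup table and keeps the non-empty dicts, instead of A's single pass that maintains a running dict with an elif chain and flushes it at each delimiter.
import Mathlib
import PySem

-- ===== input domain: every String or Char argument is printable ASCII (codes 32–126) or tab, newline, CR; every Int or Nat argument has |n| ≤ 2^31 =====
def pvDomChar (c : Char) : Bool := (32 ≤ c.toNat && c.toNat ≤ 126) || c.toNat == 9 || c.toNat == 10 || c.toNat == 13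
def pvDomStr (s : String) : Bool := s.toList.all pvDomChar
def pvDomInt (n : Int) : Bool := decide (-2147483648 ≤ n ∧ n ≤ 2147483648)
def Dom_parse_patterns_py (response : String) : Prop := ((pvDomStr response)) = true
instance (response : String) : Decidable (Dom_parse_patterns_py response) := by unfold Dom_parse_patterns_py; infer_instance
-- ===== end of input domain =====

-- B groups the lines into raw blocks first and builds each block's dict from a prefix/key table,
-- instead of A's running dict flushed at each 'Pattern name:' line (alternative decomposition, same cost).

-- ===== PORT A =====
-- loop body of A's `for line in lines` (state: (patterns, current_pattern))
def pvStepA (st : List (List (String × String)) × PySem.Dict String String) (line : String) :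
    List (List (String × String)) × PySem.Dict String String :=
  if PySem.Str.startswith line "Pattern name:" then
    ((if st.2.items.isEmpty then st.1 else st.1 ++ [st.2.items]),
     PySem.Dict.ofList [("name", PySem.Str.strip (PySem.Str.replace line "Pattern name:" ""))])
  else if PySem.Str.startswith line "Description:" then
    (st.1, st.2.insert "description" (PySem.Str.strip (PySem.Str.replace line "Description:" "")))
  else if PySem.Str.startswith line "Frequency:" then
    (st.1, st.2.insert "frequency" (PySem.Str.strip (PySem.Str.replace line "Frequency:" "")))
  else if PySem.Str.startswith line "Recommendation:" then
    (st.1, st.2.insert "recommendation" (PySem.Str.strip (PySem.Str.replace line "Recommendation:" "")))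
  else if PySem.Str.startswith line "Priority:" then
    (st.1, st.2.insert "priority" (PySem.Str.strip (PySem.Str.replace line "Priority:" "")))
  else st

def parse_patterns_py (response : String) : List (List (String × String)) :=
  let lines := (PySem.Str.split? response "\n").getD []   -- sep "\n" ≠ "", so split? is `some`
  let st := lines.foldl pvStepA ([], PySem.Dict.empty)
  if st.2.items.isEmpty then st.1 else st.1 ++ [st.2.items]

-- ===== PORT B =====
def pvKeys : List (String × String) :=
  [("Pattern name:", "name"), ("Description:", "description"), ("Frequency:", "frequency"),
   ("Recommendation:", "recommendation"), ("Priority:", "priority")]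

-- loop body of B's grouping pass (state: blocks)
def pvGroup (blocks : List (List String)) (line : String) : List (List String) :=
  if PySem.Str.startswith line "Pattern name:" || blocks.isEmpty then blocks ++ [[line]]
  else blocks.dropLast ++ [blocks.getLast! ++ [line]]

-- body of B's inner `for line in block` loop (first matching table entry wins, like the `break`)
def pvBlockStep (d : PySem.Dict String String) (line : String) : PySem.Dict String String :=
  match pvKeys.find? (fun pk => PySem.Str.startswith line pk.1) with
  | some pk => d.insert pk.2 (PySem.Str.strip (PySem.Str.replace line pk.1 ""))
  | none => d

def pvBlockDict (block : List String) : PySem.Dict String String :=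
  block.foldl pvBlockStep PySem.Dict.empty

def parse_patterns_py_alt (response : String) : List (List (String × String)) :=
  let lines := (PySem.Str.split? response "\n").getD []   -- sep "\n" ≠ "", so split? is `some`
  let blocks := lines.foldl pvGroup []
  ((blocks.map pvBlockDict).filter (fun d => !d.items.isEmpty)).map (·.items)

-- ===== PRECONDITION & SPEC =====
def Spec_parse_patterns_py (response : String) (out : List (List (String × String))) : Prop := out = parse_patterns_py_alt response
instance (response : String) (out : List (List (String × String))) : Decidable (Spec_parse_patterns_py response out) := by unfold Spec_parse_patterns_py; infer_instance

-- ===== CLAIM (what is proved, stated in full; the proofs are below) =====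
def Claim_equal_parse_patterns_py : Prop := ∀ (response : String), Dom_parse_patterns_py response → Spec_parse_patterns_py response (parse_patterns_py response)

-- ===== LEMMAS AND PROOFS =====

-- A's elif tail (the non-delimiter updates of current_pattern)
def pvUpd (d : PySem.Dict String String) (line : String) : PySem.Dict String String :=
  if PySem.Str.startswith line "Description:" then
    d.insert "description" (PySem.Str.strip (PySem.Str.replace line "Description:" ""))
  else if PySem.Str.startswith line "Frequency:" then
    d.insert "frequency" (PySem.Str.strip (PySem.Str.replace line "Frequency:" ""))
  else if PySem.Str.startswith line "Recommendation:" then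
    d.insert "recommendation" (PySem.Str.strip (PySem.Str.replace line "Recommendation:" ""))
  else if PySem.Str.startswith line "Priority:" then
    d.insert "priority" (PySem.Str.strip (PySem.Str.replace line "Priority:" ""))
  else d

def pvFlush (d : PySem.Dict String String) : List (List (String × String)) :=
  if d.items.isEmpty then [] else [d.items]

-- the common meaning of the remaining lines, given the dict accumulated so far
def pvMid (d : PySem.Dict String String) : List String → List (List (String × String))
  | [] => pvFlush d
  | l :: ls =>
    if PySem.Str.startswith l "Pattern name:" then
      pvFlush d ++
        pvMid (PySem.Dict.ofList [("name", PySem.Str.strip (PySem.Str.replace l "Pattern name:" ""))]) ls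
    else pvMid (pvUpd d l) ls

theorem pvStepA_name (st) (l : String) (h : PySem.Str.startswith l "Pattern name:" = true) :
    pvStepA st l = (st.1 ++ pvFlush st.2,
      PySem.Dict.ofList [("name", PySem.Str.strip (PySem.Str.replace l "Pattern name:" ""))]) := by
  simp only [pvStepA, h, if_true, pvFlush]
  split <;> simp

theorem pvStepA_other (st) (l : String) (h : PySem.Str.startswith l "Pattern name:" = false) :
    pvStepA st l = (st.1, pvUpd st.2 l) := by
  simp only [pvStepA, pvUpd, h, Bool.false_eq_true, if_false]
  split_ifs <;> rfl

-- A's loop + final flush compute pvMid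
theorem pvA_loop (ls : List String) : ∀ (p : List (List (String × String))) d,
    (ls.foldl pvStepA (p, d)).1 ++ pvFlush (ls.foldl pvStepA (p, d)).2 = p ++ pvMid d ls := by
  induction ls with
  | nil => intro p d; simp [pvMid]
  | cons l ls ih =>
    intro p d
    simp only [List.foldl_cons, pvMid]
    cases h : PySem.Str.startswith l "Pattern name:" with
    | true => rw [pvStepA_name (p, d) l h, ih, List.append_assoc]; simp
    | false => rw [pvStepA_other (p, d) l h, ih]; simp

-- B's table lookup agrees with A's branches
theorem pvBlockStep_name (d) (l : String) (h : PySem.Str.startswith l "Pattern name:" = true) :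
    pvBlockStep d l =
      d.insert "name" (PySem.Str.strip (PySem.Str.replace l "Pattern name:" "")) := by
  simp only [pvBlockStep, pvKeys, List.find?, h]

theorem pvBlockStep_other (d) (l : String) (h : PySem.Str.startswith l "Pattern name:" = false) :
    pvBlockStep d l = pvUpd d l := by
  simp only [pvBlockStep, pvKeys, List.find?, h]
  cases h1 : PySem.Str.startswith l "Description:" <;>
    cases h2 : PySem.Str.startswith l "Frequency:" <;>
      cases h3 : PySem.Str.startswith l "Recommendation:" <;>
        cases h4 : PySem.Str.startswith l "Priority:" <;>
          simp only [pvUpd, h1, h2, h3, h4, Bool.false_eq_true, if_true, if_false]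

def pvOut (blocks : List (List String)) : List (List (String × String)) :=
  ((blocks.map pvBlockDict).filter (fun d => !d.items.isEmpty)).map (·.items)

theorem pvOut_concat (bs : List (List String)) (c : List String) :
    pvOut (bs ++ [c]) = pvOut bs ++ pvFlush (pvBlockDict c) := by
  simp only [pvOut, List.map_append, List.filter_append, List.map_append, pvFlush]
  cases h : (pvBlockDict c).items.isEmpty <;> simp [List.filter, h]

-- B's grouping pass computes pvMid of the current block's dict
theorem pvB_loop (ls : List String) : ∀ (bs : List (List String)) (cur : List String),
    pvOut (ls.foldl pvGroup (bs ++ [cur])) = pvOut bs ++ pvMid (pvBlockDict cur) ls := by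
  induction ls with
  | nil => intro bs cur; simp [pvMid, pvOut_concat]
  | cons l ls ih =>
    intro bs cur
    simp only [List.foldl_cons, pvMid]
    cases h : PySem.Str.startswith l "Pattern name:" with
    | true =>
      have hg : pvGroup (bs ++ [cur]) l = (bs ++ [cur]) ++ [[l]] := by
        unfold pvGroup; rw [h]; simp
      rw [hg, ih, pvOut_concat]
      have hd : pvBlockDict [l] =
          PySem.Dict.ofList [("name", PySem.Str.strip (PySem.Str.replace l "Pattern name:" ""))] := by
        simp only [pvBlockDict, List.foldl_cons, List.foldl_nil]
        rw [pvBlockStep_name _ _ h]; rfl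
      rw [hd]; simp [List.append_assoc]
    | false =>
      have hg : pvGroup (bs ++ [cur]) l = bs ++ [cur ++ [l]] := by
        unfold pvGroup; rw [h]; simp
      rw [hg, ih]
      have hd : pvBlockDict (cur ++ [l]) = pvUpd (pvBlockDict cur) l := by
        simp only [pvBlockDict, List.foldl_append, List.foldl_cons, List.foldl_nil]
        exact pvBlockStep_other _ _ h
      rw [hd]
      simp

-- ===== VERDICT (by name: the statement is the Claim_ definition above) =====
theorem parse_patterns_py_spec : Claim_equal_parse_patterns_py := by
  intro response _
  unfold Spec_parse_patterns_py
  have hfin : ∀ st : List (List (String × String)) × PySem.Dict String String,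
      (if st.2.items.isEmpty then st.1 else st.1 ++ [st.2.items]) = st.1 ++ pvFlush st.2 := by
    intro st; unfold pvFlush; split <;> simp
  have hA : parse_patterns_py response =
      (((PySem.Str.split? response "\n").getD []).foldl pvStepA ([], PySem.Dict.empty)).1 ++
        pvFlush (((PySem.Str.split? response "\n").getD []).foldl pvStepA ([], PySem.Dict.empty)).2 := by
    simp only [parse_patterns_py]; exact hfin _
  have hB : parse_patterns_py_alt response =
      pvOut (((PySem.Str.split? response "\n").getD []).foldl pvGroup []) := rfl
  rw [hA, hB]
  cases hls : (PySem.Str.split? response "\n").getD [] with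
  | nil => simp [pvFlush, pvOut, PySem.Dict.empty]
  | cons l ls =>
    have hg : pvGroup [] l = [] ++ [[l]] := by unfold pvGroup; simp
    rw [List.foldl_cons, List.foldl_cons, hg, pvB_loop ls [] [l], pvA_loop]
    cases h : PySem.Str.startswith l "Pattern name:" with
    | true =>
      rw [pvStepA_name ([], PySem.Dict.empty) l h]
      have hd : pvBlockDict [l] =
          PySem.Dict.ofList [("name", PySem.Str.strip (PySem.Str.replace l "Pattern name:" ""))] := by
        simp only [pvBlockDict, List.foldl_cons, List.foldl_nil]
        rw [pvBlockStep_name _ _ h]; rfl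
      rw [hd]; simp [pvOut, pvFlush, PySem.Dict.empty]
    | false =>
      rw [pvStepA_other ([], PySem.Dict.empty) l h]
      have hd : pvBlockDict [l] = pvUpd PySem.Dict.empty l := by
        simp only [pvBlockDict, List.foldl_cons, List.foldl_nil]
        exact pvBlockStep_other _ _ h
      rw [hd]; simp [pvOut, PySem.Dict.empty]
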